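-- pv_equiv track=rewrite | github.com/codenamegyoungho/rosalind_solution | rosalind_1I.py | find
-- ===== SOURCE A (Python) =====
-- def find(target,hamming):
--     result = []
--     base = ['A','C','G','T']
--
--
--     def ca(remain_distance,current_seq,index):
--         remain = remain_distance
--         if remain == 0:
--             result.append(current_seq)
--             return
--
--         for u in range(index,len(current_seq)):
--             for char in base:
--                 if current_seq[u] != char:
--                     new_seq = current_seq[:u] + char + current_seq[u+1:]
--                     ca(remain_distance-1,new_seq,u+1)
--     ca(hamming,target,0)
--     return result
-- ===== SOURCE B (Python) =====
-- def find(target, hamming):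
--     # Iterative DFS: explicit stack of (remain, seq, index) frames replaces
--     # A's recursion; children pushed in reverse so pop order = A's emission order.
--     base = ['A', 'C', 'G', 'T']
--     n = len(target)
--     result = []
--     stack = [(hamming, target, 0)]
--     while stack:
--         remain, seq, index = stack.pop()
--         if remain == 0:
--             result.append(seq)
--             continue
--         children = [(remain - 1, seq[:u] + c + seq[u + 1:], u + 1)
--                     for u in range(index, n)
--                     for c in base if seq[u] != c]
--         stack.extend(reversed(children))
--     return result
-- ===== Notes on version B (the rewrite author's own statement) =====
-- stated objective: alternative
-- what changed: Replaced the nested recursive DFS with an explicit iterative worklist loop over (remain, seq, index) frames, pushing children in reverse so popping reproduces A's exact emission order.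
import Mathlib
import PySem

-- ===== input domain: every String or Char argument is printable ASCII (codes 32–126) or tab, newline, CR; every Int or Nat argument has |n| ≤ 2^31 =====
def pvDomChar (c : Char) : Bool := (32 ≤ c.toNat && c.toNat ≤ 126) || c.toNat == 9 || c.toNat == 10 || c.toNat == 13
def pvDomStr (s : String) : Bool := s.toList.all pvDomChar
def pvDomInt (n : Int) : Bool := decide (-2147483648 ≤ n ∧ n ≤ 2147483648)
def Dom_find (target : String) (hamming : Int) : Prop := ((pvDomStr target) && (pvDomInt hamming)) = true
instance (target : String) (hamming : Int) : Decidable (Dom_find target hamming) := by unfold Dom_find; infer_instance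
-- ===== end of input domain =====

-- B replaces A's recursive DFS by an explicit iterative stack of (remain, seq, index)
-- frames (children pushed in reverse generation order), same emission order; alternative
-- decomposition, same cost.

-- ===== PORT A =====
-- A's inner recursion `ca`, with the mutated `result` threaded as the returned list
-- (appends in DFS order become concatenation) and the `for u in range(index, len)` loop
-- written as structural recursion on the remaining iteration count `m` (= len - index; a
-- pure totality counter, since every sequence keeps the target's length).  Strings are
-- handled as List Char; `current_seq[u]` is only read at u < len, where `getD` is exact,
-- and `current_seq[:u] + char + current_seq[u+1:]` is `take u ++ char :: drop (u+1)`.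
def caA : Int → List Char → Nat → Nat → List (List Char)
  | r, s, i, m =>
    if r = 0 then [s]
    else
      match m with
      | 0 => []
      | m + 1 =>
        (['A', 'C', 'G', 'T'].flatMap fun c =>
          if s.getD i ' ' ≠ c then
            caA (r - 1) (s.take i ++ c :: s.drop (i + 1)) (i + 1) m
          else []) ++ caA r s (i + 1) m

def find (target : String) (hamming : Int) : List String :=
  (caA hamming target.toList 0 target.toList.length).map String.ofList

-- ===== PORT B =====
-- the list comprehension building the child frames of one popped frame
def childrenB (r : Int) (s : List Char) (i n : Nat) : List (Int × List Char × Nat) :=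
  (List.range' i (n - i)).flatMap fun u =>
    ['A', 'C', 'G', 'T'].filterMap fun c =>
      if s.getD u ' ' ≠ c then some (r - 1, s.take u ++ c :: s.drop (u + 1), u + 1) else none

-- weight of a worklist (5^(n - index) per frame): a totality counter for the loop,
-- strictly decreasing at every iteration (proved in wsumB_childrenB_lt below)
def wsumB (n : Nat) (st : List (Int × List Char × Nat)) : Nat :=
  (st.map fun f => 5 ^ (n - f.2.2)).sum

-- the `while stack:` loop; the Python stack's top is the head of the list, so
-- `stack.extend(reversed(children))` is `children ++ rest` after the pop; `fuel` is a
-- pure totality counter (started at the worklist's weight, it never runs out)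
def loopB (n : Nat) : Nat → List (Int × List Char × Nat) → List (List Char)
  | _, [] => []
  | 0, _ :: _ => []
  | fuel + 1, (r, s, i) :: rest =>
    if r = 0 then s :: loopB n fuel rest
    else loopB n fuel (childrenB r s i n ++ rest)

def find_alt (target : String) (hamming : Int) : List String :=
  (loopB target.toList.length
    (wsumB target.toList.length [(hamming, target.toList, 0)])
    [(hamming, target.toList, 0)]).map String.ofList

-- ===== PRECONDITION & SPEC =====
def Spec_find (target : String) (hamming : Int) (out : List String) : Prop := out = find_alt target hamming
instance (target : String) (hamming : Int) (out : List String) : Decidable (Spec_find target hamming out) := by unfold Spec_find; infer_instance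

-- ===== CLAIM (what is proved, stated in full; the proofs are below) =====
def Claim_equal_find : Prop := ∀ (target : String) (hamming : Int), Dom_find target hamming → Spec_find target hamming (find target hamming)

-- ===== LEMMAS AND PROOFS =====

theorem wsumB_append (n : Nat) (a b : List (Int × List Char × Nat)) :
    wsumB n (a ++ b) = wsumB n a + wsumB n b := by
  simp [wsumB]

-- the children of one frame weigh strictly less than the frame itself
theorem wsumB_childrenB_lt (r : Int) (s : List Char) (n : Nat) :
    ∀ i, wsumB n (childrenB r s i n) < 5 ^ (n - i) := by
  suffices h : ∀ m i, n - i = m → wsumB n (childrenB r s i n) < 5 ^ m by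
    intro i; exact h (n - i) i rfl
  intro m
  induction m with
  | zero =>
    intro i hi
    simp [childrenB, hi, wsumB]
  | succ m ih =>
    intro i hi
    have hi1 : n - (i + 1) = m := by omega
    have hsplit : childrenB r s i n =
        (['A', 'C', 'G', 'T'].filterMap fun c =>
          if s.getD i ' ' ≠ c then some (r - 1, s.take i ++ c :: s.drop (i + 1), i + 1)
          else none) ++ childrenB r s (i + 1) n := by
      simp [childrenB, hi, hi1, List.range'_succ]
    have h1 : wsumB n (['A', 'C', 'G', 'T'].filterMap fun c =>
        if s.getD i ' ' ≠ c then some (r - 1, s.take i ++ c :: s.drop (i + 1), i + 1)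
        else none) ≤ 4 * 5 ^ m := by
      simp only [List.filterMap]
      split_ifs <;> simp [wsumB, hi1] <;> omega
    have h2 := ih (i + 1) hi1
    rw [hsplit, wsumB_append]
    have : 5 ^ (m + 1) = 5 * 5 ^ m := by ring
    omega

-- every child frame keeps the sequence length n (for sequences of length n)
theorem mem_childrenB_len {r : Int} {s : List Char} {i n : Nat}
    {f : Int × List Char × Nat} (hf : f ∈ childrenB r s i n) (hs : s.length = n) :
    f.2.1.length = n := by
  simp only [childrenB, List.mem_flatMap, List.mem_filterMap] at hf
  obtain ⟨u, hu, c, _, hc⟩ := hf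
  rw [List.mem_range'_1] at hu
  split at hc
  · cases hc
    simp only []
    simp
    omega
  · cases hc

-- A's DFS emits exactly its current sequence when remain == 0, whatever the counter
theorem caA_zero (s : List Char) (i k : Nat) : caA 0 s i k = [s] := by
  cases k <;> simp [caA]

-- flat-mapping A's DFS over the children of one frame recovers A's recursion body
theorem childrenB_flatMap (r : Int) (s : List Char) (hr : r ≠ 0) :
    ∀ m i, s.length - i = m →
      (childrenB r s i s.length).flatMap
          (fun f => caA f.1 f.2.1 f.2.2 (s.length - f.2.2)) = caA r s i m := by
  intro m
  induction m with
  | zero =>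
    intro i hi
    rw [caA]
    simp [childrenB, hi, hr]
  | succ m ih =>
    intro i hi
    have hlt : i < s.length := by omega
    have hi1 : s.length - (i + 1) = m := by omega
    have hsplit : childrenB r s i s.length =
        (['A', 'C', 'G', 'T'].filterMap fun c =>
          if s.getD i ' ' ≠ c then some (r - 1, s.take i ++ c :: s.drop (i + 1), i + 1)
          else none) ++ childrenB r s (i + 1) s.length := by
      simp [childrenB, hi, hi1, List.range'_succ]
    rw [hsplit, List.flatMap_append, ih (i + 1) hi1]
    have hrhs : caA r s i (m + 1) =
        (['A', 'C', 'G', 'T'].flatMap fun c =>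
          if s.getD i ' ' ≠ c then caA (r - 1) (s.take i ++ c :: s.drop (i + 1)) (i + 1) m
          else []) ++ caA r s (i + 1) m := by
      conv_lhs => rw [caA]
      rw [if_neg hr]
    rw [hrhs]
    congr 1
    simp only [List.filterMap, List.getD_eq_getElem?_getD, List.flatMap_cons, List.flatMap_nil,
      List.append_nil]
    split_ifs <;> simp [hi1]
  
-- with enough fuel, the worklist loop emits, frame by frame, exactly A's DFS output
theorem loopB_eq (n : Nat) :
    ∀ (fuel : Nat) (st : List (Int × List Char × Nat)),
      wsumB n st ≤ fuel → (∀ f ∈ st, f.2.1.length = n) →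
      loopB n fuel st = st.flatMap (fun f => caA f.1 f.2.1 f.2.2 (n - f.2.2)) := by
  intro fuel
  induction fuel with
  | zero =>
    intro st hw _
    match st with
    | [] => rfl
    | (r, s, i) :: rest =>
      exfalso
      simp [wsumB] at hw
  | succ fuel ih =>
    intro st hw hlen
    match st with
    | [] => rfl
    | (r, s, i) :: rest =>
      have hpos : 0 < 5 ^ (n - i) := Nat.pow_pos (by norm_num)
      have hw' : 5 ^ (n - i) + wsumB n rest ≤ fuel + 1 := by
        simpa [wsumB] using hw
      have hs : s.length = n := hlen (r, s, i) List.mem_cons_self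
      by_cases hr : r = 0
      · subst hr
        rw [loopB, if_pos rfl]
        rw [ih rest (by omega) (fun f hf => hlen f (List.mem_cons_of_mem _ hf))]
        rw [List.flatMap_cons, caA_zero]
        simp
      · rw [loopB, if_neg hr]
        have hwc := wsumB_childrenB_lt r s n i
        rw [ih (childrenB r s i n ++ rest)
          (by rw [wsumB_append]; omega)
          (by
            intro f hf
            rcases List.mem_append.mp hf with h | h
            · exact mem_childrenB_len h hs
            · exact hlen f (List.mem_cons_of_mem _ h))]
        rw [List.flatMap_append, List.flatMap_cons]
        congr 1
        rw [← hs]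
        exact childrenB_flatMap r s hr (s.length - i) i rfl

-- ===== VERDICT (by name: the statement is the Claim_ definition above) =====
theorem find_spec : Claim_equal_find := by
  intro target hamming _
  unfold Spec_find find find_alt
  rw [loopB_eq target.toList.length _ [(hamming, target.toList, 0)] le_rfl (by simp)]
  simp
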